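-- pv_equiv track=rewrite | github.com/raphael-group/mascote | src/Support.py | startendbins
-- ===== SOURCE A (Python) =====
-- def cumsumbins(lis):
--     total = 0
--     for x in lis:
--         total += x[1] - x[0]
--         yield total
--
-- def startendbins(bins, start, size):
--     cumsum = list(cumsumbins(bins))
--     startbin = -1
--
--     for index, item in enumerate(cumsum):
--         if item > start:
--             startbin = index
--             break
--
--     if startbin == -1:
--         raise ValueError('The start bin must be inside the given sequence of bins!')
--
--     endbin = -1
--     for index, item in enumerate(cumsum[startbin:]):
--         if item > start+size:
--             endbin = index
--             break
--
--     return startbin, startbin+endbin+1 if endbin != -1 else len(bins)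
-- ===== SOURCE B (Python) =====
-- def startendbins(bins, start, size):
--     # Single pass: running total replaces the materialised cumsum list and the
--     # two separate enumerate scans; returns early at the end bin.
--     total = 0
--     startbin = None
--     for i, (lo, hi) in enumerate(bins):
--         total += hi - lo
--         if startbin is None and total > start:
--             startbin = i
--         if startbin is not None and total > start + size:
--             return startbin, i + 1
--     if startbin is None:
--         raise ValueError('The start bin must be inside the given sequence of bins!')
--     return startbin, len(bins)
-- ===== Notes on version B (the rewrite author's own statement) =====
-- stated objective: simpler
-- what changed: Replaces A's materialised cumsum list plus two separate enumerate scans (the second over a slice) by a single pass with a running total that finds both bin indices and returns early.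
import Mathlib
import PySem

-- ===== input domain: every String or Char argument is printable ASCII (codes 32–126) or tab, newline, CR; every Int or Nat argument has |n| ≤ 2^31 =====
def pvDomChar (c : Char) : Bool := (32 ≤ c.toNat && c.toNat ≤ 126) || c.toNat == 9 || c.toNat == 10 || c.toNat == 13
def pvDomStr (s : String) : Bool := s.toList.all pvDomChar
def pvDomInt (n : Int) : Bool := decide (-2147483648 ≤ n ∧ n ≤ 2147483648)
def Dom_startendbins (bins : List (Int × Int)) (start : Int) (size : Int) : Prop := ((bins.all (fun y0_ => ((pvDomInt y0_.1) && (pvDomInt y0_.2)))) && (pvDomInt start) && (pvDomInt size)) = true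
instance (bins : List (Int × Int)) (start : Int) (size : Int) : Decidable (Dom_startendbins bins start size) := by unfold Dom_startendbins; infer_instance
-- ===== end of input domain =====

-- B replaces A's materialised cumsum list and two enumerate scans by one single pass with a
-- running total and an early return; same return values, same ValueError condition (excluded by Pre_).

-- ===== PORT A =====
-- cumsumbins: the generator with its running `total` accumulator (A calls it with total = 0)
def cumsumbins : Int → List (Int × Int) → List Int
  | _, [] => []
  | total, x :: xs => (total + (x.2 - x.1)) :: cumsumbins (total + (x.2 - x.1)) xs

-- `for index, item in enumerate(l): if item > thr: return index` with result -1 when no break fires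
def findGT : List Int → Int → Int → Int
  | [], _, _ => -1
  | x :: xs, thr, i => if x > thr then i else findGT xs thr (i + 1)

def startendbins (bins : List (Int × Int)) (start : Int) (size : Int) : Int × Int :=
  let cumsum := cumsumbins 0 bins
  let startbin := findGT cumsum start 0
  if startbin = -1 then (0, 0)  -- Python raises ValueError here; excluded by Pre_
  else
    -- cumsum[startbin:] : startbin ≥ 0 and ≤ len(cumsum) in this branch, so drop is exact
    let endbin := findGT (cumsum.drop startbin.toNat) (start + size) 0
    (startbin, if endbin ≠ -1 then startbin + endbin + 1 else (bins.length : Int))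

-- ===== PORT B =====
-- the single loop of Source B: state = (running total, optional startbin, index i); n = len(bins)
def goAlt (start size n : Int) : Int → Option Int → Int → List (Int × Int) → Int × Int
  | _total, sb, _i, [] =>
      match sb with
      | none => (0, 0)       -- Python raises ValueError here; excluded by Pre_
      | some s => (s, n)
  | total, sb, i, (lo, hi) :: rest =>
      let total := total + (hi - lo)
      match sb with
      | none =>
          if total > start then
            if total > start + size then (i, i + 1)
            else goAlt start size n total (some i) (i + 1) rest
          else goAlt start size n total none (i + 1) rest
      | some s =>
          if total > start + size then (s, i + 1)
          else goAlt start size n total (some s) (i + 1) rest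

def startendbins_alt (bins : List (Int × Int)) (start : Int) (size : Int) : Int × Int :=
  goAlt start size (bins.length : Int) 0 none 0 bins

-- ===== PRECONDITION & SPEC =====
-- Pre_ excludes exactly the inputs where A raises ValueError: no prefix of the bins has
-- cumulative width exceeding `start`.
def Pre_startendbins (bins : List (Int × Int)) (start : Int) (size : Int) : Prop :=
  ∃ k ∈ List.range bins.length, ((bins.take (k + 1)).map (fun p => p.2 - p.1)).sum > start
instance (bins : List (Int × Int)) (start : Int) (size : Int) : Decidable (Pre_startendbins bins start size) := by unfold Pre_startendbins; infer_instance

def pvWitness_startendbins : (List (Int × Int)) × Int × Int := ([(0, 2)], 0, 1)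

def Spec_startendbins (bins : List (Int × Int)) (start : Int) (size : Int) (out : Int × Int) : Prop := out = startendbins_alt bins start size
instance (bins : List (Int × Int)) (start : Int) (size : Int) (out : Int × Int) : Decidable (Spec_startendbins bins start size out) := by unfold Spec_startendbins; infer_instance

-- ===== CLAIM (what is proved, stated in full; the proofs are below) =====
def Claim_equal_startendbins : Prop := ∀ (bins : List (Int × Int)) (start : Int) (size : Int), Dom_startendbins bins start size → Pre_startendbins bins start size → Spec_startendbins bins start size (startendbins bins start size)

-- ===== LEMMAS AND PROOFS =====

-- first index (as Option Nat) whose element exceeds thr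
def idxGT : List Int → Int → Option Nat
  | [], _ => none
  | x :: xs, thr => if x > thr then some 0 else (idxGT xs thr).map (· + 1)

theorem findGT_eq (l : List Int) (thr : Int) : ∀ i,
    findGT l thr i = match idxGT l thr with | none => -1 | some k => i + (k : Int) := by
  induction l with
  | nil => intro i; simp [findGT, idxGT]
  | cons x xs ih =>
      intro i
      by_cases h : x > thr
      · simp [findGT, idxGT, h]
      · simp only [findGT, idxGT, if_neg h, ih (i + 1)]
        cases hx : idxGT xs thr with
        | none => simp
        | some k => simp; push_cast; ring

theorem cumsumbins_length (l : List (Int × Int)) : ∀ t, (cumsumbins t l).length = l.length := by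
  induction l with
  | nil => intro t; simp [cumsumbins]
  | cons x xs ih => intro t; simp [cumsumbins, ih]

theorem idxGT_none_iff (l : List Int) (thr : Int) :
    idxGT l thr = none ↔ ∀ x ∈ l, x ≤ thr := by
  induction l with
  | nil => simp [idxGT]
  | cons x xs ih =>
      by_cases hx : x > thr
      · simp only [idxGT, if_pos hx]
        constructor
        · intro h; exact absurd h (by simp)
        · intro h; exact absurd (h x (by simp)) (not_le.mpr hx)
      · simp [idxGT, hx, ih]; intro _; omega

theorem cumsumbins_getElem (l : List (Int × Int)) : ∀ (t : Int) (k : Nat) (h : k < l.length),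
    (cumsumbins t l)[k]'(by rw [cumsumbins_length]; exact h)
      = t + ((l.take (k + 1)).map (fun p => p.2 - p.1)).sum := by
  induction l with
  | nil => intro t k h; simp at h
  | cons x xs ih =>
      intro t k h
      cases k with
      | zero => simp [cumsumbins]
      | succ k =>
          simp only [cumsumbins, List.getElem_cons_succ, List.take_succ_cons, List.map_cons,
            List.sum_cons]
          rw [ih (t + (x.2 - x.1)) k (by simpa using h)]
          ring

-- the `some s` phase of Source B's loop: only the end-bin test remains
theorem goAlt_some (start size n : Int) (l : List (Int × Int)) : ∀ (t s i : Int),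
    goAlt start size n t (some s) i l
      = match idxGT (cumsumbins t l) (start + size) with
        | none => (s, n)
        | some k => (s, i + (k : Int) + 1) := by
  induction l with
  | nil => intro t s i; simp [goAlt, cumsumbins, idxGT]
  | cons x xs ih =>
      intro t s i
      obtain ⟨lo, hi⟩ := x
      by_cases h : t + (hi - lo) > start + size
      · simp [goAlt, cumsumbins, idxGT, h]
      · simp only [goAlt, cumsumbins, idxGT, if_neg h, ih (t + (hi - lo)) s (i + 1)]
        cases hx : idxGT (cumsumbins (t + (hi - lo)) xs) (start + size) with
        | none => simp
        | some k => simp; push_cast; ring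

-- the `none` phase: find the start bin, then behave like the `some` phase from that element on
theorem goAlt_none (start size n : Int) (l : List (Int × Int)) : ∀ (t i : Int),
    goAlt start size n t none i l
      = match idxGT (cumsumbins t l) start with
        | none => (0, 0)
        | some k =>
            match idxGT ((cumsumbins t l).drop k) (start + size) with
            | none => (i + (k : Int), n)
            | some j => (i + (k : Int), i + (k : Int) + (j : Int) + 1) := by
  induction l with
  | nil => intro t i; simp [goAlt, cumsumbins, idxGT]
  | cons x xs ih =>
      intro t i
      obtain ⟨lo, hi⟩ := x
      by_cases h : t + (hi - lo) > start
      · by_cases h2 : t + (hi - lo) > start + size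
        · simp [goAlt, cumsumbins, idxGT, h, h2]
        · rw [show goAlt start size n t none i ((lo, hi) :: xs)
                = goAlt start size n (t + (hi - lo)) (some i) (i + 1) xs from by
              simp [goAlt, h, h2]]
          rw [goAlt_some]
          simp [cumsumbins, idxGT, h, h2]
          cases hx : idxGT (cumsumbins (t + (hi - lo)) xs) (start + size) with
          | none => simp
          | some j => simp; push_cast; ring
      · rw [show goAlt start size n t none i ((lo, hi) :: xs)
              = goAlt start size n (t + (hi - lo)) none (i + 1) xs from by
            simp [goAlt, h]]
        rw [ih]
        simp [cumsumbins, idxGT, h]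
        cases hx : idxGT (cumsumbins (t + (hi - lo)) xs) start with
        | none => simp
        | some k =>
            simp only [Option.map_some, List.drop_succ_cons]
            cases hy : idxGT ((cumsumbins (t + (hi - lo)) xs).drop k) (start + size) with
            | none => simp only []; refine Prod.ext ?_ rfl <;> push_cast <;> ring
            | some j => simp only []; refine Prod.ext ?_ ?_ <;> push_cast <;> ring

theorem pre_iff (bins : List (Int × Int)) (start size : Int) :
    Pre_startendbins bins start size ↔ idxGT (cumsumbins 0 bins) start ≠ none := by
  rw [Ne, idxGT_none_iff]
  unfold Pre_startendbins
  constructor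
  · rintro ⟨k, hk, hgt⟩ hall
    rw [List.mem_range] at hk
    have := hall ((cumsumbins 0 bins)[k]'(by rw [cumsumbins_length]; exact hk))
      (List.getElem_mem _)
    rw [cumsumbins_getElem bins 0 k hk] at this
    omega
  · intro h
    by_contra hc
    push_neg at hc
    apply h
    intro x hx
    obtain ⟨k, hk, rfl⟩ := List.getElem_of_mem hx
    have hk' : k < bins.length := by rwa [cumsumbins_length] at hk
    have := hc k (List.mem_range.mpr hk')
    rw [cumsumbins_getElem bins 0 k hk']
    omega

-- ===== VERDICT (by name: the statement is the Claim_ definition above) =====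
theorem startendbins_spec : Claim_equal_startendbins := by
  intro bins start size _hdom hpre
  unfold Spec_startendbins startendbins startendbins_alt
  rw [pre_iff] at hpre
  cases hk : idxGT (cumsumbins 0 bins) start with
  | none => exact absurd hk hpre
  | some k =>
      simp only [findGT_eq, hk, goAlt_none, zero_add]
      have hk0 : ¬ ((k : Int) = -1) := by omega
      rw [if_neg hk0]
      have htn : (k : Int).toNat = k := Int.toNat_natCast k
      rw [htn]
      cases hj : idxGT ((cumsumbins 0 bins).drop k) (start + size) with
      | none => simp
      | some j =>
          simp only []
          have hj0 : ((j : Int)) ≠ -1 := by omega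
          rw [if_pos hj0]
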